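-- pv_equiv track=rewrite | github.com/ThiccestZexie/tdde23 | lab4/lab4a.py | split_rec
-- ===== SOURCE A (Python) =====
-- def split_rec(encodedmessage):
--
--     if encodedmessage == "":
--          return "", ""
--
--     low, up = split_rec(encodedmessage[1:])
--     if encodedmessage[0].islower():
--         low = encodedmessage[0] + low
--     elif encodedmessage[0].isupper():
--         up = encodedmessage[0] + up
--     if encodedmessage[0] in ['_', '_']:
--         low = encodedmessage[0] + low
--     elif encodedmessage[0] in [' ', '|']:
--         up = encodedmessage[0] + up
--
--     return low, up
-- ===== SOURCE B (Python) =====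
-- def split_rec(encodedmessage):
--     low = ''.join(c for c in encodedmessage if c.islower() or c == '_')
--     up = ''.join(c for c in encodedmessage if c.isupper() or c in ' |')
--     return low, up
-- ===== Notes on version B (the rewrite author's own statement) =====
-- stated objective: idiomatic
-- what changed: Replaces the single recursive per-character routing pass (building both strings back-to-front through the call stack) with two independent filtering passes that each select their own characters with a join over a comprehension.
import Mathlib
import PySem

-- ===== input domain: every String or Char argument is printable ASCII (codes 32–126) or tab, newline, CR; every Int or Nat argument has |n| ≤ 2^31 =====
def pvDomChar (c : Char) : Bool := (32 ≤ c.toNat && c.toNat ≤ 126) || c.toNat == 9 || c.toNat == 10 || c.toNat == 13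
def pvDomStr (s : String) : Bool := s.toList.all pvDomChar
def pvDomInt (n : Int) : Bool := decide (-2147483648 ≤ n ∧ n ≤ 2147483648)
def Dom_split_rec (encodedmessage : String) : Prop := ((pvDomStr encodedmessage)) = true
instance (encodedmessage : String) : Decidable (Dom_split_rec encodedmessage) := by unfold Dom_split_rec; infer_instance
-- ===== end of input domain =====

-- B replaces A's single recursive per-character routing pass with two independent filtering passes (idiomatic; same O(n) work).

-- ===== PORT A =====
-- A recurses on the tail (s[1:]) and routes s[0] into one of the two accumulated strings.
def splitRecA : List Char → List Char × List Char
  | [] => ([], [])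
  | c :: rest =>
    let r := splitRecA rest
    let lu :=
      if PySem.Chars.islower c then (c :: r.1, r.2)
      else if PySem.Chars.isupper c then (r.1, c :: r.2)
      else (r.1, r.2)
    if c = '_' ∨ c = '_' then (c :: lu.1, lu.2)
    else if c = ' ' ∨ c = '|' then (lu.1, c :: lu.2)
    else (lu.1, lu.2)

def split_rec (encodedmessage : String) : String × String :=
  let p := splitRecA encodedmessage.toList
  (String.ofList p.1, String.ofList p.2)

-- ===== PORT B =====
def split_rec_alt (encodedmessage : String) : String × String :=
  (String.ofList (encodedmessage.toList.filter (fun c => PySem.Chars.islower c || c == '_')),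
   String.ofList (encodedmessage.toList.filter (fun c => PySem.Chars.isupper c || c == ' ' || c == '|')))

-- ===== PRECONDITION & SPEC =====
def Spec_split_rec (encodedmessage : String) (out : String × String) : Prop := out = split_rec_alt encodedmessage
instance (encodedmessage : String) (out : String × String) : Decidable (Spec_split_rec encodedmessage out) := by unfold Spec_split_rec; infer_instance

-- ===== CLAIM (what is proved, stated in full; the proofs are below) =====
def Claim_equal_split_rec : Prop := ∀ (encodedmessage : String), Dom_split_rec encodedmessage → Spec_split_rec encodedmessage (split_rec encodedmessage)

-- ===== LEMMAS AND PROOFS =====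

theorem not_isupper_of_islower (c : Char) (h : PySem.Chars.islower c = true) :
    PySem.Chars.isupper c = false := by
  simp only [PySem.Chars.islower, PySem.Chars.isupper, Bool.and_eq_true, decide_eq_true_eq] at h ⊢
  simp only [Bool.and_eq_false_iff, decide_eq_false_iff_not]
  right
  intro h3
  exact absurd (h.1.trans h3) (by decide)

theorem splitRecA_eq_filters (l : List Char) :
    splitRecA l =
      (l.filter (fun c => PySem.Chars.islower c || c == '_'),
       l.filter (fun c => PySem.Chars.isupper c || c == ' ' || c == '|')) := by
  induction l with
  | nil => rfl
  | cons c rest ih =>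
    by_cases hus : c = '_'
    · subst hus
      simp [splitRecA, ih, List.filter, PySem.Chars.islower, PySem.Chars.isupper]
    · by_cases hsp : c = ' '
      · subst hsp
        simp [splitRecA, ih, List.filter, PySem.Chars.islower, PySem.Chars.isupper]
      · by_cases hbar : c = '|'
        · subst hbar
          simp [splitRecA, ih, List.filter, PySem.Chars.islower, PySem.Chars.isupper]
        · have b1 : (c == '_') = false := by simp [hus]
          have b2 : (c == ' ') = false := by simp [hsp]
          have b3 : (c == '|') = false := by simp [hbar]
          cases hl : PySem.Chars.islower c with
          | true =>
            have hu := not_isupper_of_islower c hl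
            simp [splitRecA, ih, List.filter, hl, hu, b1, b2, b3, hus, hsp, hbar]
          | false =>
            cases hu : PySem.Chars.isupper c with
            | true => simp [splitRecA, ih, List.filter, hl, hu, b1, b2, b3, hus, hsp, hbar]
            | false => simp [splitRecA, ih, List.filter, hl, hu, b1, b2, b3, hus, hsp, hbar]

-- ===== VERDICT (by name: the statement is the Claim_ definition above) =====
theorem split_rec_spec : Claim_equal_split_rec := by
  intro s _
  show split_rec s = split_rec_alt s
  simp [split_rec, split_rec_alt, splitRecA_eq_filters]
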